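-- pv_equiv track=rewrite | github.com/axelsmagichammer/A112509 | src/algorithms/MH_algorithm.py | clean_runs
-- ===== SOURCE A (Python) =====
-- from typing import List, Set, Tuple, Dict, Optional
--
-- def clean_runs(runs: List[int]) -> List[int]:
--     """
--     Remove zero-length runs and merge adjacent runs of the same type.
--
--     This handles edge cases where operations might create invalid run encodings.
--
--     Args:
--         runs: Run-length encoding that may contain zeros
--
--     Returns:
--         Cleaned run-length encoding
--     """
--     if not runs:
--         return []
--
--     cleaned = []
--     i = 0
--
--     while i < len(runs):
--         if runs[i] == 0:
--             # Skip zero-length run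
--             # If there are runs before and after, they're now adjacent and same type
--             if cleaned and i + 1 < len(runs):
--                 # Merge the last cleaned run with the next run
--                 cleaned[-1] += runs[i + 1]
--                 i += 2  # Skip both the zero and the next run (already merged)
--             else:
--                 i += 1  # Just skip the zero
--         else:
--             cleaned.append(runs[i])
--             i += 1
--
--     return cleaned
-- ===== SOURCE B (Python) =====
-- from itertools import groupby
--
-- def clean_runs(runs):
--     """Two-phase: keep nonzero values tagged with index parity, then sum groupby runs of equal parity."""
--     typed = [(i % 2, v) for i, v in enumerate(runs) if v != 0]
--     return [sum(v for _, v in g) for _, g in groupby(typed, key=lambda t: t[0])]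
-- ===== Notes on version B (the rewrite author's own statement) =====
-- stated objective: alternative
-- what changed: Replaces A's index-stepping while loop (with in-place merge into cleaned[-1] and a two-step skip over zeros) by a two-phase pipeline: filter nonzero values tagged with index parity, then groupby equal parity and sum each group.
import Mathlib
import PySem

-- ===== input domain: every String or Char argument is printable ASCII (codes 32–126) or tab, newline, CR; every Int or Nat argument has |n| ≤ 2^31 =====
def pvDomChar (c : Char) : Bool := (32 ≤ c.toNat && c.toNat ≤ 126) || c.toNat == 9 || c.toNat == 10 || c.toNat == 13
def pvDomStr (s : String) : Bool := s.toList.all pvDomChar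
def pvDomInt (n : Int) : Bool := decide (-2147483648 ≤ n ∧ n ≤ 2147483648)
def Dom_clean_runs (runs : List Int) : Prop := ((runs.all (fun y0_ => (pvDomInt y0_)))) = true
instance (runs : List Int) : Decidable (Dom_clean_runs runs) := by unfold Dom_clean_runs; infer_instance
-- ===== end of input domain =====

-- B replaces A's index-stepping merge loop by filter-nonzero-tagged-with-parity then groupby-parity-and-sum; same value everywhere (alternative decomposition, no speed claim).

-- ===== PORT A =====
-- the while loop of A: state (cleaned, i); cleaned[-1] += runs[i+1] becomes dropLast ++ [getLast! + …]
def cleanRunsLoop (runs : List Int) (cleaned : List Int) (i : Nat) : List Int :=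
  if i < runs.length then
    if runs.getD i 0 = 0 then
      if cleaned ≠ [] ∧ i + 1 < runs.length then
        cleanRunsLoop runs (cleaned.dropLast ++ [cleaned.getLast! + runs.getD (i+1) 0]) (i+2)
      else
        cleanRunsLoop runs cleaned (i+1)
    else
      cleanRunsLoop runs (cleaned ++ [runs.getD i 0]) (i+1)
  else cleaned
termination_by runs.length - i

def clean_runs (runs : List Int) : List Int :=
  if runs = [] then [] else cleanRunsLoop runs [] 0

-- ===== PORT B =====
-- itertools.groupby over the typed list, emitting the sum of each group's values
def groupSums : List (Int × Int) → List Int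
  | [] => []
  | (k, v) :: rest =>
      (v + ((rest.takeWhile (fun p => p.1 == k)).map Prod.snd).sum)
        :: groupSums (rest.dropWhile (fun p => p.1 == k))
termination_by l => l.length
decreasing_by simpa using List.length_dropWhile_le _ _

def clean_runs_alt (runs : List Int) : List Int :=
  groupSums (((PySem.List.enumerate runs).filter (fun p => p.2 != 0)).map (fun p => (p.1 % 2, p.2)))

-- ===== PRECONDITION & SPEC =====
def Spec_clean_runs (runs : List Int) (out : List Int) : Prop := out = clean_runs_alt runs
instance (runs : List Int) (out : List Int) : Decidable (Spec_clean_runs runs out) := by unfold Spec_clean_runs; infer_instance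

-- ===== CLAIM (what is proved, stated in full; the proofs are below) =====
def Claim_equal_clean_runs : Prop := ∀ (runs : List Int), Dom_clean_runs runs → Spec_clean_runs runs (clean_runs runs)

-- ===== LEMMAS AND PROOFS =====

-- the typed survivors of the suffix of runs from index i, with index-parity keys
def tf : List Int → Nat → List (Int × Int)
  | [], _ => []
  | v :: rest, i => if v = 0 then tf rest (i+1) else ((i : Int) % 2, v) :: tf rest (i+1)

theorem groupSums_merge (p a b : Int) (l : List (Int × Int)) :
    groupSums ((p, a) :: (p, b) :: l) = groupSums ((p, a + b) :: l) := by
  rw [groupSums, groupSums]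
  simp [List.takeWhile, List.dropWhile]
  ring

theorem groupSums_split (p q a b : Int) (l : List (Int × Int)) (h : p ≠ q) :
    groupSums ((p, a) :: (q, b) :: l) = a :: groupSums ((q, b) :: l) := by
  rw [groupSums]
  simp [Ne.symm h]

theorem groupSums_single (p a : Int) : groupSums [(p, a)] = [a] := by
  rw [groupSums]
  simp [groupSums]

theorem loopSnoc (runs : List Int) :
    ∀ n i c a, runs.length ≤ i + n →
      cleanRunsLoop runs (c ++ [a]) i
        = c ++ groupSums ((((i : Int) + 1) % 2, a) :: tf (runs.drop i) i) := by
  intro n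
  induction n using Nat.strong_induction_on with
  | _ n IH =>
    intro i c a hn
    by_cases hi : i < runs.length
    · have hdrop : runs.drop i = runs[i] :: runs.drop (i+1) := List.drop_eq_getElem_cons hi
      have hget : runs.getD i 0 = runs[i] := List.getD_eq_getElem runs 0 hi
      rw [cleanRunsLoop, if_pos hi]
      by_cases hz : runs.getD i 0 = 0
      · rw [if_pos hz]
        have hz' : runs[i] = 0 := by rw [← hget]; exact hz
        by_cases h2 : i + 1 < runs.length
        · rw [if_pos ⟨by simp, h2⟩]
          have hdrop2 : runs.drop (i+1) = runs[i+1] :: runs.drop (i+2) :=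
            List.drop_eq_getElem_cons h2
          have hget2 : runs.getD (i+1) 0 = runs[i+1] := List.getD_eq_getElem runs 0 h2
          have hrec := IH (n-2) (by omega) (i+2) c (a + runs.getD (i+1) 0) (by omega)
          have hlast : (c ++ [a]).getLast! = a := by simp
          rw [List.dropLast_concat, hlast, hrec, hdrop, tf, if_pos hz', hdrop2, tf]
          by_cases hz2 : runs[i+1] = 0
          · rw [if_pos hz2]
            have : ((((i:Nat)+2 : Nat) : Int) + 1) % 2 = (((i:Nat) : Int) + 1) % 2 := by
              push_cast; omega
            rw [this, hget2, hz2, add_zero]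
          · rw [if_neg hz2]
            have hk2 : ((((i+1) : Nat) : Int)) % 2 = (((i:Nat) : Int) + 1) % 2 := by
              push_cast; ring_nf
            rw [hk2, groupSums_merge]
            have : ((((i:Nat)+2 : Nat) : Int) + 1) % 2 = (((i:Nat) : Int) + 1) % 2 := by
              push_cast; omega
            rw [this, hget2]
        · rw [if_neg (by simp [h2])]
          have hrec := IH (n-1) (by omega) (i+1) c a (by omega)
          have hd1 : runs.drop (i+1) = [] := List.drop_eq_nil_of_le (by omega)
          rw [hrec]
          simp [hd1, hdrop, tf, hz', groupSums_single]
      · rw [if_neg hz]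
        have hz' : ¬ runs[i] = 0 := by rw [← hget]; exact hz
        have hrec := IH (n-1) (by omega) (i+1) (c ++ [a]) (runs.getD i 0) (by omega)
        rw [hrec, hdrop, tf, if_neg hz']
        have hk : ((((i+1) : Nat) : Int) + 1) % 2 = (((i:Nat) : Int)) % 2 := by push_cast; omega
        have hne : (((i:Nat) : Int) + 1) % 2 ≠ (((i:Nat) : Int)) % 2 := by omega
        rw [hk, hget, groupSums_split _ _ _ _ _ hne]
        simp
    · rw [cleanRunsLoop, if_neg hi]
      rw [List.drop_eq_nil_of_le (by omega), tf, groupSums_single]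

theorem loopNil (runs : List Int) :
    ∀ n i, runs.length ≤ i + n →
      cleanRunsLoop runs [] i = groupSums (tf (runs.drop i) i) := by
  intro n
  induction n with
  | zero =>
    intro i hn
    rw [cleanRunsLoop, if_neg (by omega), List.drop_eq_nil_of_le (by omega), tf, groupSums]
  | succ m IH =>
    intro i hn
    by_cases hi : i < runs.length
    · have hdrop : runs.drop i = runs[i] :: runs.drop (i+1) := List.drop_eq_getElem_cons hi
      have hget : runs.getD i 0 = runs[i] := List.getD_eq_getElem runs 0 hi
      rw [cleanRunsLoop, if_pos hi]
      by_cases hz : runs.getD i 0 = 0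
      · have hz' : runs[i] = 0 := by rw [← hget]; exact hz
        rw [if_pos hz, if_neg (by simp), IH (i+1) (by omega), hdrop, tf, if_pos hz']
      · have hz' : ¬ runs[i] = 0 := by rw [← hget]; exact hz
        rw [if_neg hz]
        have hrec := loopSnoc runs m (i+1) [] (runs.getD i 0) (by omega)
        rw [List.nil_append] at hrec
        simp only [List.nil_append]
        rw [hrec, hdrop, tf, if_neg hz', hget]
        have hk : ((((i+1) : Nat) : Int) + 1) % 2 = (((i:Nat) : Int)) % 2 := by push_cast; omega
        rw [hk, List.nil_append]
    · rw [cleanRunsLoop, if_neg hi, List.drop_eq_nil_of_le (by omega), tf, groupSums]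

theorem tf_enum (l : List Int) : ∀ (j : Nat),
    tf l j = ((PySem.List.enumerate l (j : Int)).filter (fun p => p.2 != 0)).map
               (fun p => (p.1 % 2, p.2)) := by
  induction l with
  | nil => intro j; rfl
  | cons v rest IH =>
    intro j
    rw [tf, PySem.List.enumerate_cons]
    by_cases hv : v = 0
    · rw [if_pos hv]
      simp [hv, IH (j+1)]
    · rw [if_neg hv]
      simp [hv, IH (j+1)]

-- ===== VERDICT (by name: the statement is the Claim_ definition above) =====
theorem clean_runs_spec : Claim_equal_clean_runs := by
  intro runs _
  unfold Spec_clean_runs clean_runs clean_runs_alt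
  split
  · subst runs; rw [(by rfl : PySem.List.enumerate ([]:List Int) = [])]; simp; rw [groupSums]
  · rw [loopNil runs runs.length 0 (by omega), List.drop_zero, tf_enum]
    norm_num
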